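-- pv_equiv track=rewrite | github.com/debbie525/codewars | Weird_String_Case.py | weird_string_case
-- ===== SOURCE A (Python) =====
-- def weird_string_case(string):
--     new_string = ""
--     index=0
--
--     for character in string:
--         if character ==" ":
--             index = -1
--             new_string+=character
--         else:
--             if index%2 == 0:
--                 new_string+=character.upper()
--             else:
--                 new_string+=character.lower()
--         index+=1
--
--     return new_string
-- ===== SOURCE B (Python) =====
-- def weird_string_case(string):
--     words = string.split(" ")
--     fixed = [
--         "".join(ch.upper() if i % 2 == 0 else ch.lower() for i, ch in enumerate(word))
--         for word in words
--     ]
--     return " ".join(fixed)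
-- ===== Notes on version B (the rewrite author's own statement) =====
-- stated objective: idiomatic
-- what changed: Replaces A's single flat loop with a sentinel index reset at spaces by splitting the string on literal spaces, recasing each word by its own enumerate position, and rejoining the words with a single-space separator.
import Mathlib
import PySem

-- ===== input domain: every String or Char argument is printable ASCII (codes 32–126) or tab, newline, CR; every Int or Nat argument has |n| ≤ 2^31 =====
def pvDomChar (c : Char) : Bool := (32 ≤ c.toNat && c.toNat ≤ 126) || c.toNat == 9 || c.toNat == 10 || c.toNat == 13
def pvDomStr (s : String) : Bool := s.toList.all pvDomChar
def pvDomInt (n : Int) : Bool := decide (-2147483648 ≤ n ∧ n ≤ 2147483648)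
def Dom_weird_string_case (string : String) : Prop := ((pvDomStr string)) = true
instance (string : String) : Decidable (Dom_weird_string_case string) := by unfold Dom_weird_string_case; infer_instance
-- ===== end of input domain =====

-- B rewrites A's flat sentinel-reset loop as split-on-space / per-word indexed recasing / rejoin (objective: idiomatic decomposition, same cost).

-- ===== PORT A =====
-- A's loop body: on a space, index is reset to -1 before the common 'index += 1'.
def pvStepA (st : List Char × Int) (character : Char) : List Char × Int :=
  let p :=
    if character == ' ' then (st.1 ++ [character], (-1 : Int))
    else if PySem.Int.mod st.2 2 == 0 then (st.1 ++ [PySem.Chars.upperChar character], st.2)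
    else (st.1 ++ [PySem.Chars.lowerChar character], st.2)
  (p.1, p.2 + 1)

def weird_string_case (string : String) : String :=
  let r := string.toList.foldl pvStepA (([] : List Char), (0 : Int))
  String.ofList r.1

-- ===== PORT B =====
-- Source B: split(" "), recase each word by its enumerate index, " ".join.
def pvCaps (word : List Char) : List Char :=
  (PySem.List.enumerate word).map (fun p =>
    if PySem.Int.mod p.1 2 == 0 then PySem.Chars.upperChar p.2 else PySem.Chars.lowerChar p.2)

def weird_string_case_alt (string : String) : String :=
  let words := PySem.Chars.splitOn string.toList [' ']
  let fixed := words.map pvCaps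
  String.ofList (PySem.Chars.join [' '] fixed)

-- ===== PRECONDITION & SPEC =====
def Spec_weird_string_case (string : String) (out : String) : Prop := out = weird_string_case_alt string
instance (string : String) (out : String) : Decidable (Spec_weird_string_case string out) := by unfold Spec_weird_string_case; infer_instance

-- ===== CLAIM (what is proved, stated in full; the proofs are below) =====
def Claim_equal_weird_string_case : Prop := ∀ (string : String), Dom_weird_string_case string → Spec_weird_string_case string (weird_string_case string)

-- ===== LEMMAS AND PROOFS =====

-- A's loop as a structural recursion on the remaining characters.
def pvGoA : Int → List Char → List Char
  | _, [] => []
  | idx, c :: cs =>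
    if c = ' ' then c :: pvGoA 0 cs
    else (if PySem.Int.mod idx 2 == 0 then PySem.Chars.upperChar c else PySem.Chars.lowerChar c)
           :: pvGoA (idx + 1) cs

-- split(" ") with an explicit current-word accumulator (matches splitOn.go's traversal).
def pvSplit : List Char → List Char → List (List Char)
  | pre, [] => [pre]
  | pre, c :: cs => if c = ' ' then pre :: pvSplit [] cs else pvSplit (pre ++ [c]) cs

theorem pvStepA_space (acc : List Char) (idx : Int) (c : Char) (h : c = ' ') :
    pvStepA (acc, idx) c = (acc ++ [c], 0) := by
  simp [pvStepA, h]

theorem pvStepA_even (acc : List Char) (idx : Int) (c : Char) (h : ¬ c = ' ')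
    (h2 : (2:Int) ∣ idx) :
    pvStepA (acc, idx) c = (acc ++ [PySem.Chars.upperChar c], idx + 1) := by
  simp [pvStepA, h, h2]

theorem pvStepA_odd (acc : List Char) (idx : Int) (c : Char) (h : ¬ c = ' ')
    (h2 : ¬ (2:Int) ∣ idx) :
    pvStepA (acc, idx) c = (acc ++ [PySem.Chars.lowerChar c], idx + 1) := by
  simp [pvStepA, h, h2]

theorem pvFoldA (cs : List Char) : ∀ (acc : List Char) (idx : Int),
    (cs.foldl pvStepA (acc, idx)).1 = acc ++ pvGoA idx cs := by
  induction cs with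
  | nil => intro acc idx; simp [pvGoA]
  | cons c cs ih =>
    intro acc idx
    rw [List.foldl_cons]
    by_cases h : c = ' '
    · rw [pvStepA_space acc idx c h, ih, pvGoA]
      simp [h]
    · by_cases h2 : (2:Int) ∣ idx
      · rw [pvStepA_even acc idx c h h2, ih, pvGoA]
        simp [h, h2]
      · rw [pvStepA_odd acc idx c h h2, ih, pvGoA]
        simp [h, h2]

theorem pvGo_eq : ∀ (fuel : Nat) (l cur : List Char) (acc : List (List Char)),
    l.length < fuel →
    PySem.Chars.splitOn.go [' '] fuel l cur acc = acc.reverse ++ pvSplit cur.reverse l := by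
  intro fuel
  induction fuel with
  | zero => intro l cur acc h; omega
  | succ fuel ih =>
    intro l cur acc h
    cases l with
    | nil => simp [PySem.Chars.splitOn.go, pvSplit]
    | cons c rest =>
      by_cases hc : c = ' '
      · subst hc
        rw [show PySem.Chars.splitOn.go [' '] (fuel+1) (' ' :: rest) cur acc
              = PySem.Chars.splitOn.go [' '] fuel rest [] (cur.reverse :: acc) from by
            simp [PySem.Chars.splitOn.go, List.isPrefixOf]]
        rw [ih rest [] (cur.reverse :: acc) (by simpa using Nat.lt_of_succ_lt_succ h)]
        simp [pvSplit]
      · rw [show PySem.Chars.splitOn.go [' '] (fuel+1) (c :: rest) cur acc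
              = PySem.Chars.splitOn.go [' '] fuel rest (c :: cur) acc from by
            have hc' : ¬ ' ' = c := fun h => hc h.symm
            simp [PySem.Chars.splitOn.go, List.isPrefixOf, hc']]
        rw [ih rest (c :: cur) acc (by simpa using Nat.lt_of_succ_lt_succ h)]
        simp [pvSplit, hc]

theorem pvSplitOn_eq (cs : List Char) :
    PySem.Chars.splitOn cs [' '] = pvSplit [] cs := by
  have := pvGo_eq (cs.length + 1) cs [] [] (by omega)
  simpa [PySem.Chars.splitOn] using this

theorem pvSplit_ne_nil (cs : List Char) : ∀ (pre : List Char), pvSplit pre cs ≠ [] := by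
  induction cs with
  | nil => intro pre; simp [pvSplit]
  | cons c cs ih =>
    intro pre
    by_cases h : c = ' ' <;> simp [pvSplit, h, ih]

theorem pvEnumerate_append (xs ys : List Char) : ∀ (s : Int),
    PySem.List.enumerate (xs ++ ys) s
      = PySem.List.enumerate xs s ++ PySem.List.enumerate ys (s + xs.length) := by
  induction xs with
  | nil => intro s; simp [PySem.List.enumerate]
  | cons x xs ih =>
    intro s
    simp [PySem.List.enumerate, ih (s + 1)]
    ring_nf

theorem pvMain (cs : List Char) : ∀ (pre : List Char),
    PySem.Chars.join [' '] ((pvSplit pre cs).map pvCaps)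
      = pvCaps pre ++ pvGoA (pre.length) cs := by
  induction cs with
  | nil => intro pre; simp [pvSplit, pvGoA, PySem.Chars.join, List.intercalate]
  | cons c cs ih =>
    intro pre
    by_cases hc : c = ' '
    · subst hc
      rw [show pvSplit pre (' ' :: cs) = pre :: pvSplit [] cs from by simp [pvSplit]]
      rw [show pvGoA (pre.length : Int) (' ' :: cs) = ' ' :: pvGoA 0 cs from by simp [pvGoA]]
      have hih := ih []
      obtain ⟨w, ws, hws⟩ : ∃ w ws, pvSplit [] cs = w :: ws := by
        cases h : pvSplit [] cs with
        | nil => exact absurd h (pvSplit_ne_nil cs [])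
        | cons w ws => exact ⟨w, ws, rfl⟩
      rw [hws] at hih
      rw [show pvCaps [] = [] from rfl] at hih
      simp only [List.length_nil, Nat.cast_zero, List.nil_append, List.map_cons] at hih
      rw [hws]
      simp only [List.map_cons]
      rw [show PySem.Chars.join [' '] (pvCaps pre :: pvCaps w :: ws.map pvCaps)
            = pvCaps pre ++ [' '] ++ PySem.Chars.join [' '] (pvCaps w :: ws.map pvCaps) from by
          simp [PySem.Chars.join, List.intercalate]]
      rw [hih]
      simp
    · have hih := ih (pre ++ [c])
      simp only [pvSplit, if_neg hc]
      rw [hih]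
      have he : pvCaps (pre ++ [c])
          = pvCaps pre ++ [if PySem.Int.mod (pre.length : Int) 2 == 0
              then PySem.Chars.upperChar c else PySem.Chars.lowerChar c] := by
        simp only [pvCaps, pvEnumerate_append, List.map_append, PySem.List.enumerate]
        simp
      rw [he, pvGoA]
      simp only [if_neg hc]
      have hl : ((pre ++ [c]).length : Int) = (pre.length : Int) + 1 := by
        simp
      rw [hl]
      simp

theorem weird_string_case_spec : Claim_equal_weird_string_case := by
  intro s _
  unfold Spec_weird_string_case weird_string_case weird_string_case_alt
  simp only []
  rw [pvFoldA s.toList [] 0, pvSplitOn_eq, pvMain s.toList []]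
  rw [show pvCaps [] = [] from rfl]
  simp
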